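-- pv_equiv track=rewrite | github.com/balbinamolerus/BiteHacka2022 | telegram.py | check_building
-- ===== SOURCE A (Python) =====
-- def check_building(messagetocheck, building, textspace):
--     lastBuilding = ''
--     goodToGo = False
--     for i in range(len(messagetocheck)):
--         if messagetocheck.startswith('9A', i):
--             lastBuilding = '9A'
--         if messagetocheck.startswith('9B', i):
--             lastBuilding = '9B'
--         if messagetocheck.startswith('9C', i):
--             lastBuilding = '9C'
--         if messagetocheck.startswith('7A', i):
--             lastBuilding = '7A'
--         if messagetocheck.startswith(textspace, i) and lastBuilding == building:
--             goodToGo = True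
--     return goodToGo
-- ===== SOURCE B (Python) =====
-- def check_building(messagetocheck, building, textspace):
--     # Jump between textspace occurrences with str.find; keep the marker state
--     # incrementally: scan backwards from each occurrence only down to the
--     # previous occurrence, falling back to the carried state.
--     n = len(messagetocheck)
--     markers = ('9A', '9B', '9C', '7A')
--     last = ''          # marker state for all positions < start
--     start = 0
--     while start <= n:
--         i = messagetocheck.find(textspace, start)
--         if i == -1 or i >= n:
--             return False
--         for j in range(i, start - 1, -1):   # most recent marker at position <= i
--             m = messagetocheck[j:j + 2]
--             if m in markers:
--                 last = m
--                 break
--         if last == building: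
--             return True
--         start = i + 1
--     return False
-- ===== Notes on version B (the rewrite author's own statement) =====
-- stated objective: faster
-- what changed: Replaces the per-index scan that runs five startswith tests at every position with a find-driven loop: str.find jumps straight to each textspace occurrence and the marker state is updated by a short backward scan (with early break) only over the gap since the previous occurrence, returning True at the first hit.
import Mathlib
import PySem

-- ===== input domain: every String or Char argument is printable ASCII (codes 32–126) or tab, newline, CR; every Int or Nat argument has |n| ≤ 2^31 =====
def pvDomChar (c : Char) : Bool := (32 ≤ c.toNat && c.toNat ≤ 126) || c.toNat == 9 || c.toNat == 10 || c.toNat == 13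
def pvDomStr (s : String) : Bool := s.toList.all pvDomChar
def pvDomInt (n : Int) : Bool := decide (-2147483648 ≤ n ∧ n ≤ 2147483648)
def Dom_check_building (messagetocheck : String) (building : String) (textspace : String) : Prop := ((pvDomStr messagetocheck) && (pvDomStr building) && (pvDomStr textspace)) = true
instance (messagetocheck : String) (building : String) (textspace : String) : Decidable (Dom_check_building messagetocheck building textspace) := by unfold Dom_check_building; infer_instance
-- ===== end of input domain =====

-- B replaces A's per-index scan (five startswith tests at every position) by a find-driven
-- loop with an incremental backward marker scan and early exit; measurably faster.

-- ===== PORT A =====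
-- Python's messagetocheck.startswith(p, i) with 0 ≤ i < len is exactly
-- PySem.Chars.startswith (s.drop i.toNat) p (prefix test on the suffix starting at i).
def check_building (messagetocheck : String) (building : String) (textspace : String) : Bool :=
  let s := messagetocheck.toList
  ((PySem.List.pyRange 0 (PySem.Str.len messagetocheck) 1).foldl
    (fun (st : String × Bool) i =>
      let last := st.1
      let last := if PySem.Chars.startswith (s.drop i.toNat) "9A".toList then "9A" else last
      let last := if PySem.Chars.startswith (s.drop i.toNat) "9B".toList then "9B" else last
      let last := if PySem.Chars.startswith (s.drop i.toNat) "9C".toList then "9C" else last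
      let last := if PySem.Chars.startswith (s.drop i.toNat) "7A".toList then "7A" else last
      let good := if PySem.Chars.startswith (s.drop i.toNat) textspace.toList ∧ last = building
                  then true else st.2
      (last, good))
    ("", false)).2

-- ===== PORT B =====
-- the tuple ('9A', '9B', '9C', '7A') of Source B (as char lists, since slices are char lists)
def cbMarkers : List (List Char) := ["9A".toList, "9B".toList, "9C".toList, "7A".toList]

-- Source B's inner loop 'for j in range(i, start - 1, -1): m = s[j:j+2]; if m in markers: last = m; break'
-- (j < stop is the empty range; j = 0 with stop = 0 is the countdown running out below zero)
def cbScanBack (s : List Char) (stop : Nat) (j : Nat) (last : String) : String :=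
  if j < stop then last
  else
    let m := PySem.List.slice s (some (j : Int)) (some ((j : Int) + 2))
    if m ∈ cbMarkers then String.ofList m
    else if j = 0 then last
    else cbScanBack s stop (j - 1) last
termination_by j
decreasing_by omega

-- Source B's outer 'while start <= n' loop; PySem.Chars.findFrom is s.find(textspace, start)
def cbLoop (s : List Char) (building : String) (ts : List Char) (start : Nat) (last : String) : Bool :=
  if h1 : start ≤ s.length then
    let f := PySem.Chars.findFrom s ts (start : Int)
    if h2 : f = -1 ∨ (s.length : Int) ≤ f then false
    else
      let i := f.toNat
      let last' := cbScanBack s start i last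
      if last' = building then true
      else cbLoop s building ts (i + 1) last'
  else false
termination_by s.length + 1 - start
decreasing_by
  have hne : PySem.Chars.findFrom s ts (start : Int) ≠ -1 := fun hc => h2 (Or.inl hc)
  have := (PySem.Chars.findFrom_natCast_spec s ts start h1 hne).1
  omega

def check_building_alt (messagetocheck : String) (building : String) (textspace : String) : Bool :=
  cbLoop messagetocheck.toList building textspace.toList 0 ""

-- ===== PRECONDITION & SPEC =====
def Spec_check_building (messagetocheck : String) (building : String) (textspace : String) (out : Bool) : Prop := out = check_building_alt messagetocheck building textspace
instance (messagetocheck : String) (building : String) (textspace : String) (out : Bool) : Decidable (Spec_check_building messagetocheck building textspace out) := by unfold Spec_check_building; infer_instance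

-- ===== CLAIM (what is proved, stated in full; the proofs are below) =====
def Claim_equal_check_building : Prop := ∀ (messagetocheck : String) (building : String) (textspace : String), Dom_check_building messagetocheck building textspace → Spec_check_building messagetocheck building textspace (check_building messagetocheck building textspace)

-- ===== LEMMAS AND PROOFS =====

-- the marker (if any) starting at position j: determined by the two-char window s[j:j+2]
def cbMark (s : List Char) (j : Nat) : Option String :=
  let m := (s.drop j).take 2
  if m = "9A".toList then some "9A"
  else if m = "9B".toList then some "9B"
  else if m = "9C".toList then some "9C"
  else if m = "7A".toList then some "7A"
  else none

-- A's lastBuilding state after processing indices < k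
def cbState (s : List Char) : Nat → String
  | 0 => ""
  | k + 1 => match cbMark s k with
    | some m => m
    | none => cbState s k

theorem cbState_succ (s : List Char) (k : Nat) :
    cbState s (k + 1) = (cbMark s k).getD (cbState s k) := by
  cases h : cbMark s k <;> simp [cbState, h]

theorem cbSlice_eq_take (s : List Char) (j : Nat) :
    PySem.List.slice s (some (j : Int)) (some ((j : Int) + 2)) = (s.drop j).take 2 := by
  have h : ((j : Int) + 2) = ((j + 2 : Nat) : Int) := by push_cast; ring
  rw [h, PySem.List.slice_natCast]
  congr 1
  omega

theorem cbStartswith_take (s : List Char) (k : Nat) (m : List Char) (hm : m.length = 2) :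
    (PySem.Chars.startswith (s.drop k) m = true) ↔ (s.drop k).take 2 = m := by
  rw [PySem.Chars.startswith_iff, List.prefix_iff_eq_take, hm]
  exact eq_comm

-- the four sequential startswith-updates of A are exactly "overwrite with the marker at k, if any"
theorem cbChain_eq (s : List Char) (k : Nat) (last : String) :
    (if PySem.Chars.startswith (s.drop k) "7A".toList = true then "7A"
     else if PySem.Chars.startswith (s.drop k) "9C".toList = true then "9C"
     else if PySem.Chars.startswith (s.drop k) "9B".toList = true then "9B"
     else if PySem.Chars.startswith (s.drop k) "9A".toList = true then "9A"
     else last) = (cbMark s k).getD last := by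
  simp only [cbStartswith_take s k "7A".toList (by decide),
             cbStartswith_take s k "9C".toList (by decide),
             cbStartswith_take s k "9B".toList (by decide),
             cbStartswith_take s k "9A".toList (by decide)]
  simp only [cbMark]
  by_cases hm : (s.drop k).take 2 ∈ cbMarkers
  · have h' : (s.drop k).take 2 = "9A".toList ∨ (s.drop k).take 2 = "9B".toList ∨
        (s.drop k).take 2 = "9C".toList ∨ (s.drop k).take 2 = "7A".toList := by
      simpa [cbMarkers] using hm
    rcases h' with h | h | h | h
    · rw [h, if_neg (by decide), if_neg (by decide), if_neg (by decide), if_pos (by decide),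
        if_pos (by decide)]
      rfl
    · rw [h, if_neg (by decide), if_neg (by decide), if_pos (by decide), if_neg (by decide),
        if_pos (by decide)]
      rfl
    · rw [h, if_neg (by decide), if_pos (by decide), if_neg (by decide), if_neg (by decide),
        if_pos (by decide)]
      rfl
    · rw [h, if_pos (by decide), if_neg (by decide), if_neg (by decide), if_neg (by decide),
        if_pos (by decide)]
      rfl
  · simp only [cbMarkers, List.mem_cons, List.not_mem_nil, or_false, not_or] at hm
    obtain ⟨h1, h2, h3, h4⟩ := hm
    rw [if_neg h4, if_neg h3, if_neg h2, if_neg h1, if_neg h1, if_neg h2, if_neg h3, if_neg h4]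
    rfl

theorem cbMark_of_mem (s : List Char) (j : Nat) (h : (s.drop j).take 2 ∈ cbMarkers) :
    cbMark s j = some (String.ofList ((s.drop j).take 2)) := by
  have h' : (s.drop j).take 2 = "9A".toList ∨ (s.drop j).take 2 = "9B".toList ∨
      (s.drop j).take 2 = "9C".toList ∨ (s.drop j).take 2 = "7A".toList := by
    simpa [cbMarkers] using h
  simp only [cbMark]
  rcases h' with h' | h' | h' | h' <;> rw [h'] <;> decide

theorem cbMark_of_not_mem (s : List Char) (j : Nat) (h : (s.drop j).take 2 ∉ cbMarkers) :
    cbMark s j = none := by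
  simp only [cbMarkers, List.mem_cons, List.not_mem_nil, or_false, not_or] at h
  obtain ⟨h1, h2, h3, h4⟩ := h
  simp only [cbMark]
  rw [if_neg h1, if_neg h2, if_neg h3, if_neg h4]

theorem cbFoldA (s : List Char) (b : String) (ts : List Char) (k : Nat) :
    ((PySem.List.pyRange 0 (k : Int) 1).foldl
      (fun (st : String × Bool) i =>
        let last := st.1
        let last := if PySem.Chars.startswith (s.drop i.toNat) "9A".toList then "9A" else last
        let last := if PySem.Chars.startswith (s.drop i.toNat) "9B".toList then "9B" else last
        let last := if PySem.Chars.startswith (s.drop i.toNat) "9C".toList then "9C" else last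
        let last := if PySem.Chars.startswith (s.drop i.toNat) "7A".toList then "7A" else last
        let good := if PySem.Chars.startswith (s.drop i.toNat) ts ∧ last = b
                    then true else st.2
        (last, good))
      ("", false)) =
    (cbState s k, decide (∃ i < k, ts <+: s.drop i ∧ cbState s (i + 1) = b)) := by
  induction k with
  | zero =>
    rw [PySem.List.pyRange_one_eq_nil (by norm_num)]
    simp [cbState]
  | succ k ih =>
    have hcast : ((k + 1 : Nat) : Int) = (k : Int) + 1 := by push_cast; ring
    rw [hcast, PySem.List.pyRange_one_succ_right (by positivity), List.foldl_append, ih]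
    simp only [List.foldl_cons, List.foldl_nil, Int.toNat_natCast]
    rw [Prod.mk.injEq]
    constructor
    · rw [cbChain_eq, ← cbState_succ]
    · rw [cbChain_eq, ← cbState_succ]
      by_cases hc : PySem.Chars.startswith (s.drop k) ts = true ∧ cbState s (k + 1) = b
    -- the new index k either witnesses the property or drops out
      · rw [if_pos hc]
        exact (decide_eq_true
          ⟨k, Nat.lt_succ_self k, (PySem.Chars.startswith_iff _ _).1 hc.1, hc.2⟩).symm
      · rw [if_neg hc]
        rw [decide_eq_decide]
        constructor
        · rintro ⟨i, h1, h2, h3⟩; exact ⟨i, by omega, h2, h3⟩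
        · rintro ⟨i, h1, h2, h3⟩
          refine ⟨i, ?_, h2, h3⟩
          rcases Nat.lt_succ_iff_lt_or_eq.1 h1 with h | h
          · exact h
          · subst h
            exact absurd ⟨(PySem.Chars.startswith_iff _ _).2 h2, h3⟩ hc

theorem cbScanBack_eq (s : List Char) (start : Nat) :
    ∀ i, start ≤ i + 1 → cbScanBack s start i (cbState s start) = cbState s (i + 1) := by
  intro i
  induction i with
  | zero =>
    intro h
    rw [cbScanBack]
    rcases Nat.lt_or_ge 0 start with hlt | hge
    · have hs1 : start = 1 := by omega
      subst hs1
      simp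
    · have hs0 : start = 0 := by omega
      subst hs0
      simp only [cbSlice_eq_take, Nat.lt_irrefl, if_false]
      by_cases hm : (s.drop 0).take 2 ∈ cbMarkers
      · rw [if_pos hm, cbState_succ, cbMark_of_mem s 0 hm]
        rfl
      · rw [if_neg hm, cbState_succ, cbMark_of_not_mem s 0 hm]
        rfl
  | succ i ih =>
    intro h
    rw [cbScanBack]
    by_cases hlt : i + 1 < start
    · have hs : start = i + 2 := by omega
      subst hs
      rw [if_pos hlt]
    · rw [if_neg hlt]
      simp only [cbSlice_eq_take, Nat.succ_ne_zero, if_false, Nat.add_sub_cancel]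
      by_cases hm : (s.drop (i + 1)).take 2 ∈ cbMarkers
      · rw [if_pos hm, cbState_succ s (i + 1), cbMark_of_mem s (i + 1) hm]
        rfl
      · rw [if_neg hm, ih (by omega), cbState_succ s (i + 1), cbMark_of_not_mem s (i + 1) hm]
        rfl

-- ts <+: s.drop i with start ≤ i puts ts inside s.drop start
theorem cbInfix_of_prefix_drop (s ts : List Char) (start i : Nat) (hsi : start ≤ i)
    (h : ts <+: s.drop i) : ts <:+: s.drop start := by
  have hd : s.drop i = (s.drop start).drop (i - start) := by
    rw [List.drop_drop]
    congr 1
    omega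
  rw [hd] at h
  exact h.isInfix.trans (List.drop_suffix _ _).isInfix

theorem cbLoop_eq (s : List Char) (b : String) (ts : List Char) :
    ∀ d start, s.length + 1 - start = d → start ≤ s.length →
    cbLoop s b ts start (cbState s start) =
      decide (∃ i < s.length, start ≤ i ∧ ts <+: s.drop i ∧ cbState s (i + 1) = b) := by
  intro d
  induction d using Nat.strong_induction_on with
  | _ d ih =>
    intro start hd hstart
    rw [cbLoop, dif_pos hstart]
    by_cases h2 : PySem.Chars.findFrom s ts (start : Int) = -1 ∨
        (s.length : Int) ≤ PySem.Chars.findFrom s ts (start : Int)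
    · rw [dif_pos h2]
      symm
      rw [decide_eq_false_iff_not]
      rintro ⟨i, hin, hsi, hocc, hst⟩
      rcases h2 with hneg | hbig
      · exact (PySem.Chars.findFrom_natCast_eq_neg_one_iff s ts start hstart).1 hneg
          (cbInfix_of_prefix_drop s ts start i hsi hocc)
      · have hne : PySem.Chars.findFrom s ts (start : Int) ≠ -1 := by
          intro hc
          rw [hc] at hbig
          omega
        obtain ⟨hge, _, hmin⟩ := PySem.Chars.findFrom_natCast_spec s ts start hstart hne
        exact hmin i hsi (by omega) hocc
    · rw [dif_neg h2]
      have hne : PySem.Chars.findFrom s ts (start : Int) ≠ -1 := fun hc => h2 (Or.inl hc)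
      have hflt : PySem.Chars.findFrom s ts (start : Int) < (s.length : Int) :=
        lt_of_not_ge (fun hc => h2 (Or.inr hc))
      obtain ⟨hge, hpre, hmin⟩ := PySem.Chars.findFrom_natCast_spec s ts start hstart hne
      set f := PySem.Chars.findFrom s ts (start : Int) with hf
      have hstarti : start ≤ f.toNat := by omega
      have hiln : f.toNat < s.length := by omega
      show (if cbScanBack s start f.toNat (cbState s start) = b then true
            else cbLoop s b ts (f.toNat + 1) (cbScanBack s start f.toNat (cbState s start))) = _
      rw [cbScanBack_eq s start f.toNat (by omega)]
      by_cases hb : cbState s (f.toNat + 1) = b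
      · rw [if_pos hb]
        exact (decide_eq_true ⟨f.toNat, hiln, hstarti, hpre, hb⟩).symm
      · rw [if_neg hb]
        rw [ih (s.length + 1 - (f.toNat + 1)) (by omega) (f.toNat + 1) rfl (by omega)]
        rw [decide_eq_decide]
        constructor
        · rintro ⟨i, h1, h2', h3, h4⟩; exact ⟨i, h1, by omega, h3, h4⟩
        · rintro ⟨i, h1, h2', h3, h4⟩
          refine ⟨i, h1, ?_, h3, h4⟩
          by_contra hlt
          rcases Nat.lt_or_ge i f.toNat with hcase | hcase
          · exact hmin i h2' hcase h3
          · have : i = f.toNat := by omega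
            subst this
            exact hb h4

-- ===== VERDICT (by name: the statement is the Claim_ definition above) =====
theorem check_building_spec : Claim_equal_check_building := by
  intro msg b ts _
  unfold Spec_check_building check_building check_building_alt
  have hlen : PySem.Str.len msg = (msg.toList.length : Int) := by
    simp [pysem]
  rw [hlen]
  have hA := cbFoldA msg.toList b ts.toList msg.toList.length
  have hB := cbLoop_eq msg.toList b ts.toList (msg.toList.length + 1) 0 rfl (Nat.zero_le _)
  simp only [cbState] at hB
  rw [hB]
  show ((PySem.List.pyRange 0 (msg.toList.length : Int) 1).foldl _ ("", false)).2 = _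
  rw [hA]
  rw [decide_eq_decide]
  constructor
  · rintro ⟨i, h1, h2, h3⟩; exact ⟨i, h1, Nat.zero_le i, h2, h3⟩
  · rintro ⟨i, h1, _, h2, h3⟩; exact ⟨i, h1, h2, h3⟩
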